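-- pv_equiv track=rewrite | github.com/saeid-ebrahimi/Python | 6.List/excersices/09.chars_type_list.py | find_upper_and_lower
-- ===== SOURCE A (Python) =====
-- def find_upper_and_lower(lst):
--     up_lo_other_char_lst = [0, 0, 0]
--     for ch in lst:
--         if ch.isupper():
--             up_lo_other_char_lst[0] += 1
--         elif ch.islower():
--             up_lo_other_char_lst[1] += 1
--         else:
--             up_lo_other_char_lst[2] += 1
--     return up_lo_other_char_lst
-- ===== SOURCE B (Python) =====
-- def find_upper_and_lower(lst):
--     up = sum(1 for ch in lst if ch.isupper())
--     lo = sum(1 for ch in lst if ch.islower())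
--     return [up, lo, len(lst) - up - lo]
-- ===== Notes on version B (the rewrite author's own statement) =====
-- stated objective: idiomatic
-- what changed: Replaces the single elif-chain counting loop over a mutable 3-slot list by two filtered aggregations (count of isupper, count of islower) plus deriving the third count arithmetically as len - up - lo, using that isupper/islower are mutually exclusive.
import Mathlib
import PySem

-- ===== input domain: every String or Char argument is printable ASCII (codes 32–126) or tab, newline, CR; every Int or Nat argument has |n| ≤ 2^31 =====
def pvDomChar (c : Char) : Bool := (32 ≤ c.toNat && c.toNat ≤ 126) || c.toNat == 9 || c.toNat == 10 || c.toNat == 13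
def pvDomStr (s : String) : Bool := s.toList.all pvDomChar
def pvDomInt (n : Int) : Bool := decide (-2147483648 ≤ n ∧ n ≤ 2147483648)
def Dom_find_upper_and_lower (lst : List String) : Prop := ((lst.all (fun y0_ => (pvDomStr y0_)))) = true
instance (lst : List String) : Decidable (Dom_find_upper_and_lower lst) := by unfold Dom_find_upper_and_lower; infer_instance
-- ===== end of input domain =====

-- B replaces A's single elif-chain counting loop by two filtered counts plus an arithmetic
-- complement for the third slot (idiomatic; same O(n) cost).

-- str.isupper() / str.islower(), exact on the ASCII domain: at least one cased character and
-- every cased character upper (resp. lower); on ASCII this is "some upper and no lower" (resp. dual).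
def pyStrIsupper (s : String) : Bool :=
  (s.toList.any PySem.Chars.isupper) && !(s.toList.any PySem.Chars.islower)

def pyStrIslower (s : String) : Bool :=
  (s.toList.any PySem.Chars.islower) && !(s.toList.any PySem.Chars.isupper)

-- ===== PORT A =====
def find_upper_and_lower (lst : List String) : List Int :=
  let t := lst.foldl
    (fun (s : Int × Int × Int) ch =>
      if pyStrIsupper ch then (s.1 + 1, s.2.1, s.2.2)
      else if pyStrIslower ch then (s.1, s.2.1 + 1, s.2.2)
      else (s.1, s.2.1, s.2.2 + 1))
    (0, 0, 0)
  [t.1, t.2.1, t.2.2]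

-- ===== PORT B =====
def find_upper_and_lower_alt (lst : List String) : List Int :=
  let up : Int := (lst.filter pyStrIsupper).length
  let lo : Int := (lst.filter pyStrIslower).length
  [up, lo, (lst.length : Int) - up - lo]

-- ===== PRECONDITION & SPEC =====
def Spec_find_upper_and_lower (lst : List String) (out : List Int) : Prop := out = find_upper_and_lower_alt lst
instance (lst : List String) (out : List Int) : Decidable (Spec_find_upper_and_lower lst out) := by unfold Spec_find_upper_and_lower; infer_instance

-- ===== CLAIM (what is proved, stated in full; the proofs are below) =====
def Claim_equal_find_upper_and_lower : Prop := ∀ (lst : List String), Dom_find_upper_and_lower lst → Spec_find_upper_and_lower lst (find_upper_and_lower lst)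

-- ===== LEMMAS AND PROOFS =====

-- isupper and islower are mutually exclusive.
lemma pyStr_excl (s : String) (h : pyStrIsupper s = true) : pyStrIslower s = false := by
  unfold pyStrIsupper at h
  unfold pyStrIslower
  simp_all

-- A's loop adds the three class counts to the accumulator.
lemma foldA_key (l : List String) (u lo ot : Int) :
    l.foldl
      (fun (s : Int × Int × Int) ch =>
        if pyStrIsupper ch then (s.1 + 1, s.2.1, s.2.2)
        else if pyStrIslower ch then (s.1, s.2.1 + 1, s.2.2)
        else (s.1, s.2.1, s.2.2 + 1))
      (u, lo, ot)
    = (u + (l.countP pyStrIsupper : Int),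
       lo + (l.countP pyStrIslower : Int),
       ot + (l.countP (fun s => !pyStrIsupper s && !pyStrIslower s) : Int)) := by
  induction l generalizing u lo ot with
  | nil => simp
  | cons a l ih =>
      simp only [List.foldl_cons, List.countP_cons]
      by_cases hU : pyStrIsupper a = true
      · simp only [hU, pyStr_excl a hU, if_true, Bool.not_true, Bool.false_and, ih,
          Bool.and_self, cond_false]
        simp [Prod.ext_iff]
        omega
      · by_cases hL : pyStrIslower a = true
        · simp only [hU, hL, if_false, if_true, ih]
          simp [Prod.ext_iff, hU]
          omega
        · simp only [hU, hL, if_false, ih]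
          simp [Prod.ext_iff, hU, hL]
          omega

-- The three class counts partition the list.
lemma count_partition (l : List String) :
    l.countP pyStrIsupper + l.countP pyStrIslower
      + l.countP (fun s => !pyStrIsupper s && !pyStrIslower s) = l.length := by
  induction l with
  | nil => simp
  | cons a l ih =>
      simp only [List.countP_cons, List.length_cons]
      by_cases hU : pyStrIsupper a = true
      · simp [hU, pyStr_excl a hU]; omega
      · by_cases hL : pyStrIslower a = true
        · simp [hU, hL]; omega
        · simp [hU, hL]; omega

-- ===== VERDICT (by name: the statement is the Claim_ definition above) =====
theorem find_upper_and_lower_spec : Claim_equal_find_upper_and_lower := by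
  intro lst _
  unfold Spec_find_upper_and_lower find_upper_and_lower find_upper_and_lower_alt
  have hf1 : (lst.filter pyStrIsupper).length = lst.countP pyStrIsupper :=
    Eq.symm List.countP_eq_length_filter
  have hf2 : (lst.filter pyStrIslower).length = lst.countP pyStrIslower :=
    Eq.symm List.countP_eq_length_filter
  have h := count_partition lst
  simp only [foldA_key, hf1, hf2, List.cons.injEq, and_true]
  refine ⟨by omega, by omega, by omega⟩
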